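-- pv_equiv track=rewrite | github.com/BearHanded/advent-of-code-2024 | 02/reactor.py | row_safe
-- ===== SOURCE A (Python) =====
-- def row_safe(row, tolerant):
--   valid = True
--   row_diff = None
--   for idx in range(len(row) - 1):
--     diff = row[idx] - row[idx+1]
--     if idx == 0:
--       row_diff = diff
--     if (diff * row_diff < 0) or not (1 <= abs(diff) <= 3):
--       if not tolerant:
--         valid = False
--         break
--       for pop_idx in range(len(row)):
--         new_row = row.copy()
--         new_row.pop(pop_idx)
--         if row_safe(new_row, False):
--           return True
--       return False
--   return valid
-- ===== SOURCE B (Python) =====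
-- def _first_bad(row):
--   # index of the first adjacent pair violating the sign/step rule, else None
--   if len(row) < 2:
--     return None
--   d0 = row[0] - row[1]
--   for i in range(len(row) - 1):
--     d = row[i] - row[i + 1]
--     if d * d0 < 0 or not (1 <= abs(d) <= 3):
--       return i
--   return None
--
-- def row_safe(row, tolerant):
--   bad = _first_bad(row)
--   if bad is None:
--     return True
--   if not tolerant:
--     return False
--   # only removing an element at/next to the first violation, or one of the
--   # first two (which define the reference direction), can ever help
--   return any(_first_bad(row[:p] + row[p + 1:]) is None
--              for p in (0, 1, bad, bad + 1))
-- ===== Notes on version B (the rewrite author's own statement) =====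
-- stated objective: alternative
-- what changed: Instead of A's recursive retry that re-scans the row once for every possible removal index, B scans once for the first violating adjacent pair and retries only the four removals that can matter (indices 0, 1, bad, bad+1), since removing any other element leaves both the reference direction and the violating pair intact.
import Mathlib
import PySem

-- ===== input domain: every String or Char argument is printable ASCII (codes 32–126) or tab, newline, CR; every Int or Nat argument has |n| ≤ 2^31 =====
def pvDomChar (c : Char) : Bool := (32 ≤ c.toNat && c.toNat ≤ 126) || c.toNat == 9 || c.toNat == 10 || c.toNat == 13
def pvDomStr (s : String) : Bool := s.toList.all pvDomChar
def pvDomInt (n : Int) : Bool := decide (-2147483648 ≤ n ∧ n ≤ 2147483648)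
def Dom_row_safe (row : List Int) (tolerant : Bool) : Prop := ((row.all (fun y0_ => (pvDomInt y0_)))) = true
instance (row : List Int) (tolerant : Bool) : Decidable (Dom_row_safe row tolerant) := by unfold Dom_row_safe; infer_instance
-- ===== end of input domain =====

-- B replaces A's recursive remove-every-index retry with a single scan that retries only
-- the four removals that can matter (objective: alternative).

-- ===== PORT A =====
-- A's for-loop over idx with the carried `row_diff` and early break/return, as structural
-- recursion on idx; the inner pop loop with its early `return True` is the `any` over pop
-- indices (row[idx] is always in range at the access sites, so getD is exact).
def rowSafeGoA (row : List Int) (tolerant : Bool) (idx : Nat) (rd : Int) : Bool :=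
  if idx < row.length - 1 then
    let diff := row.getD idx 0 - row.getD (idx+1) 0
    let rd' := if idx = 0 then diff else rd
    if decide (diff * rd' < 0) || !(decide (1 ≤ |diff|) && decide (|diff| ≤ 3)) then
      if !tolerant then false
      else (List.range row.length).attach.any (fun p => rowSafeGoA (row.eraseIdx p.1) false 0 0)
    else rowSafeGoA row tolerant (idx+1) rd'
  else true
termination_by (row.length, row.length - idx)
decreasing_by
  · have hp := List.mem_range.mp p.2
    have : (row.eraseIdx p.1).length < row.length := by
      rw [List.length_eraseIdx, if_pos hp]; omega
    exact Prod.Lex.left _ _ this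
  · exact Prod.Lex.right _ (by omega)

def row_safe (row : List Int) (tolerant : Bool) : Bool := rowSafeGoA row tolerant 0 0

-- ===== PORT B =====
def pvPairBad (d0 d : Int) : Bool := decide (d * d0 < 0) || !(decide (1 ≤ |d|) && decide (|d| ≤ 3))

-- index of the first adjacent pair violating the sign/step rule (B's helper _first_bad);
-- the early-returning loop is find? over the same range
def firstBad (row : List Int) : Option Nat :=
  if row.length < 2 then none
  else
    let d0 := row.getD 0 0 - row.getD 1 0
    (List.range (row.length - 1)).find? (fun i => pvPairBad d0 (row.getD i 0 - row.getD (i+1) 0))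

def row_safe_alt (row : List Int) (tolerant : Bool) : Bool :=
  match firstBad row with
  | none => true
  | some bad =>
    if !tolerant then false
    else [0, 1, bad, bad+1].any (fun p => (firstBad (row.take p ++ row.drop (p+1))).isNone)

-- ===== PRECONDITION & SPEC =====
def Spec_row_safe (row : List Int) (tolerant : Bool) (out : Bool) : Prop := out = row_safe_alt row tolerant
instance (row : List Int) (tolerant : Bool) (out : Bool) : Decidable (Spec_row_safe row tolerant out) := by unfold Spec_row_safe; infer_instance

-- ===== CLAIM (what is proved, stated in full; the proofs are below) =====
def Claim_equal_row_safe : Prop := ∀ (row : List Int) (tolerant : Bool), Dom_row_safe row tolerant → Spec_row_safe row tolerant (row_safe row tolerant)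

-- ===== LEMMAS AND PROOFS =====

-- the diff of adjacent pair i
def Dp (row : List Int) (i : Nat) : Int := row.getD i 0 - row.getD (i+1) 0

def anyPop (row : List Int) : Bool :=
  (List.range row.length).attach.any (fun p => rowSafeGoA (row.eraseIdx p.1) false 0 0)

lemma go_char (row : List Int) (t : Bool) (rd : Int) :
    ∀ k idx, idx ≠ 0 → row.length - 1 - idx = k →
    rowSafeGoA row t idx rd =
      (match (List.range' idx k).find? (fun i => pvPairBad rd (Dp row i)) with
       | none => true
       | some _ => if t then anyPop row else false) := by
  intro k
  induction k with
  | zero =>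
    intro idx h0 hk
    rw [rowSafeGoA, if_neg (by omega)]
    simp
  | succ k ih =>
    intro idx h0 hk
    rw [rowSafeGoA, if_pos (by omega)]
    simp only [if_neg h0, List.range'_succ, List.find?_cons]
    split
    · rename_i h
      have hb : pvPairBad rd (Dp row idx) = true := h
      rw [hb]
      cases t <;> simp [anyPop]
    · rename_i h
      have hb : pvPairBad rd (Dp row idx) = false := Bool.eq_false_iff.mpr h
      rw [hb]
      exact ih (idx+1) (by omega) (by omega)

lemma row_safe_char (row : List Int) (t : Bool) :
    row_safe row t =
      (match firstBad row with
       | none => true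
       | some _ => if t then anyPop row else false) := by
  unfold firstBad
  by_cases hn : row.length < 2
  · rw [if_pos hn]
    unfold row_safe
    rw [rowSafeGoA, if_neg (by omega)]
  · rw [if_neg hn]
    obtain ⟨m, hm⟩ : ∃ m, row.length - 1 = m + 1 := ⟨row.length - 2, by omega⟩
    rw [hm, List.range_eq_range', List.range'_succ]
    simp only [List.find?_cons]
    unfold row_safe
    rw [rowSafeGoA, if_pos (by omega)]
    simp only [Nat.zero_add, if_true]
    split
    · rename_i h
      have hb : pvPairBad (row.getD 0 0 - row.getD 1 0) (row.getD 0 0 - row.getD 1 0) = true := h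
      rw [hb]
      cases t <;> simp [anyPop]
    · rename_i h
      have hb : pvPairBad (row.getD 0 0 - row.getD 1 0) (row.getD 0 0 - row.getD 1 0) = false :=
        Bool.eq_false_iff.mpr h
      rw [hb]
      exact go_char row t (row.getD 0 0 - row.getD 1 0) m 1 (by omega) (by omega)

lemma strictA_eq (row : List Int) : rowSafeGoA row false 0 0 = (firstBad row).isNone := by
  have h := row_safe_char row false
  simp only [row_safe] at h
  rw [h]; cases firstBad row <;> simp

lemma anyPop_eq (row : List Int) :
    anyPop row = (List.range row.length).any (fun p => (firstBad (row.eraseIdx p)).isNone) := by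
  simp only [anyPop, strictA_eq]
  rw [Bool.eq_iff_iff, List.any_eq_true, List.any_eq_true]
  constructor
  · rintro ⟨p, -, hp⟩; exact ⟨p.1, p.2, hp⟩
  · rintro ⟨p, hp, h⟩; exact ⟨⟨p, hp⟩, List.mem_attach _ _, h⟩

lemma getD_eraseIdx_lt (row : List Int) (p i : Nat) (h : i < p) :
    (row.eraseIdx p).getD i 0 = row.getD i 0 := by
  simp [List.getD_eq_getElem?_getD, List.getElem?_eraseIdx, h]

lemma getD_eraseIdx_ge (row : List Int) (p i : Nat) (h : p ≤ i) :
    (row.eraseIdx p).getD i 0 = row.getD (i+1) 0 := by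
  simp [List.getD_eq_getElem?_getD, List.getElem?_eraseIdx, Nat.not_lt.mpr h]

lemma firstBad_facts (row : List Int) (b : Nat) (hb : firstBad row = some b) :
    2 ≤ row.length ∧ b < row.length - 1 ∧ pvPairBad (Dp row 0) (Dp row b) = true := by
  unfold firstBad at hb
  by_cases hn : row.length < 2
  · rw [if_pos hn] at hb; exact absurd hb (by simp)
  · rw [if_neg hn] at hb
    have hb2 : List.find? (fun i => pvPairBad (row.getD 0 0 - row.getD 1 0)
        (row.getD i 0 - row.getD (i+1) 0)) (List.range (row.length - 1)) = some b := hb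
    have h3 := List.find?_some hb2
    have h4 := List.mem_of_find?_eq_some hb2
    exact ⟨by omega, List.mem_range.mp h4, h3⟩

lemma firstBad_ne_none (row : List Int) (j : Nat) (hj : j < row.length - 1)
    (hbad : pvPairBad (Dp row 0) (Dp row j) = true) : firstBad row ≠ none := by
  unfold firstBad
  rw [if_neg (by omega)]
  intro hnone
  exact absurd hbad (List.find?_eq_none.mp hnone j (List.mem_range.mpr hj))

lemma prune (row : List Int) (b : Nat) (hb : firstBad row = some b) :
    (List.range row.length).any (fun p => (firstBad (row.eraseIdx p)).isNone)
      = ([0, 1, b, b+1] : List Nat).any (fun p => (firstBad (row.eraseIdx p)).isNone) := by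
  obtain ⟨hn2, hblt, hbad⟩ := firstBad_facts row b hb
  rw [Bool.eq_iff_iff, List.any_eq_true, List.any_eq_true]
  constructor
  · rintro ⟨p, hp, hP⟩
    have hpn := List.mem_range.mp hp
    by_cases hc : p = 0 ∨ p = 1 ∨ p = b ∨ p = b + 1
    · refine ⟨p, ?_, hP⟩
      rcases hc with h | h | h | h <;> simp [h]
    · exfalso
      push Not at hc
      obtain ⟨h0, h1, hbne, hb1ne⟩ := hc
      have hel : (row.eraseIdx p).length = row.length - 1 := by
        rw [List.length_eraseIdx, if_pos hpn]
      have e0 : (row.eraseIdx p).getD 0 0 = row.getD 0 0 := getD_eraseIdx_lt _ _ _ (by omega)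
      have e1 : (row.eraseIdx p).getD 1 0 = row.getD 1 0 := getD_eraseIdx_lt _ _ _ (by omega)
      have hPnone := Option.isNone_iff_eq_none.mp hP
      rcases Nat.lt_or_ge b p with hlt | hge
      · -- b+2 ≤ p: the bad pair (b, b+1) survives unchanged
        have j1 : (row.eraseIdx p).getD b 0 = row.getD b 0 := getD_eraseIdx_lt _ _ _ (by omega)
        have j2 : (row.eraseIdx p).getD (b+1) 0 = row.getD (b+1) 0 :=
          getD_eraseIdx_lt _ _ _ (by omega)
        refine firstBad_ne_none (row.eraseIdx p) b (by rw [hel]; omega) ?_ hPnone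
        simp only [Dp, Nat.zero_add] at hbad ⊢
        rw [e0, e1, j1, j2]; exact hbad
      · -- 2 ≤ p < b: the bad pair survives as pair (b-1)
        have hpb : p < b := by omega
        have j1 : (row.eraseIdx p).getD (b-1) 0 = row.getD b 0 := by
          rw [getD_eraseIdx_ge row p (b-1) (by omega)]; congr 1; omega
        have j2 : (row.eraseIdx p).getD b 0 = row.getD (b+1) 0 :=
          getD_eraseIdx_ge row p b (by omega)
        refine firstBad_ne_none (row.eraseIdx p) (b-1) (by rw [hel]; omega) ?_ hPnone
        simp only [Dp, Nat.zero_add] at hbad ⊢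
        rw [e0, e1, j1, show b - 1 + 1 = b from by omega, j2]; exact hbad
  · rintro ⟨p, hp, hP⟩
    refine ⟨p, List.mem_range.mpr ?_, hP⟩
    simp only [List.mem_cons, List.not_mem_nil, or_false] at hp
    rcases hp with h | h | h | h <;> omega

-- ===== VERDICT (by name: the statement is the Claim_ definition above) =====
theorem row_safe_spec : Claim_equal_row_safe := by
  intro row t _
  unfold Spec_row_safe
  rw [row_safe_char]
  unfold row_safe_alt
  cases hb : firstBad row with
  | none => rfl
  | some b =>
    cases t with
    | false => rfl
    | true =>
      simp only [Bool.not_true, Bool.false_eq_true, if_true, if_false]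
      rw [anyPop_eq, prune row b hb]
      simp only [← List.eraseIdx_eq_take_drop_succ]
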